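-- pv_equiv track=rewrite | github.com/Dev-UniRios/AOC | scripts/Python/io-devices2.py | parse_ioreg_output
-- ===== SOURCE A (Python) =====
-- def parse_ioreg_output(output):
--     # Filtra a saída para exibir apenas informações de barramentos USB e PCI
--     lines = output.split('\n')
--     filtered_info = []
--     current_device = {}
--
--     for line in lines:
--         # Detecta dispositivos USB e PCI
--         if "IOUSBHostDevice" in line or "IOPCIDevice" in line:
--             if current_device:
--                 filtered_info.append(current_device)
--             current_device = {"type": "", "location": ""}
--
--             if "IOUSBHostDevice" in line:
--                 current_device["type"] = "USB Device"
--             elif "IOPCIDevice" in line: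
--                 current_device["type"] = "PCI Device"
--
--             # Captura o caminho do dispositivo no sistema (source location)
--             location = line.split("@")[1].strip() if "@" in line else "Desconhecido"
--             current_device["location"] = location
--         # Captura detalhes de dispositivos conectados
--         elif "|" in line and current_device:
--             connected_device = line.strip().split(" ")[-1]  # Nome do dispositivo conectado
--             current_device["connected"] = connected_device
--
--     if current_device:
--         filtered_info.append(current_device)
--
--     return filtered_info
-- ===== SOURCE B (Python) =====
-- def parse_ioreg_output(output):
--     # One reversed pass: the last '|' line of a block is the first one seen
--     # scanning backwards; a header emits its device and resets the pending token.
--     result = []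
--     connected = None
--     for line in reversed(output.split('\n')):
--         if "IOUSBHostDevice" in line or "IOPCIDevice" in line:
--             device = {
--                 "type": "USB Device" if "IOUSBHostDevice" in line else "PCI Device",
--                 "location": line.split("@")[1].strip() if "@" in line else "Desconhecido",
--             }
--             if connected is not None:
--                 device["connected"] = connected
--             result.append(device)
--             connected = None
--         elif connected is None and "|" in line:
--             connected = line.strip().split(" ")[-1]
--     result.reverse()
--     return result
-- ===== Notes on version B (the rewrite author's own statement) =====
-- stated objective: alternative
-- what changed: A scans forward mutating a pending device dict and flushing it at each header/EOF; B makes a single backward pass over the lines, keeping only the first detail token seen (the last one forwards), emitting each device at its header and reversing the result at the end.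
import Mathlib
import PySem

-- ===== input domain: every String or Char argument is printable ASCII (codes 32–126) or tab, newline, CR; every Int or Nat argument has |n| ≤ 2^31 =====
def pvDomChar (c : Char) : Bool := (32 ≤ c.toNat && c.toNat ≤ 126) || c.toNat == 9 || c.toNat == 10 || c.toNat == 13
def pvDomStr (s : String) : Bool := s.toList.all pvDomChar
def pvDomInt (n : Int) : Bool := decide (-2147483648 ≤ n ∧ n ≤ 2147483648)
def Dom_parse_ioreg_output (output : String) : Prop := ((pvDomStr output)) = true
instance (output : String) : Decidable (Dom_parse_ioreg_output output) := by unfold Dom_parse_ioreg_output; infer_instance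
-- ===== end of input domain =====

-- B replaces A's forward scan with mutable flushing by a single reversed scan
-- (first '|' line seen backwards = last one forwards), built back-to-front: alternative decomposition.

-- ===== PORT A =====
-- one iteration of A's for-loop; state = (filtered_info, current_device)
def pvA_step (st : List (List (String × String)) × PySem.Dict String String) (line : String) :
    List (List (String × String)) × PySem.Dict String String :=
  if PySem.Str.isIn "IOUSBHostDevice" line || PySem.Str.isIn "IOPCIDevice" line then
    let filtered := if st.2.items.isEmpty then st.1 else st.1 ++ [st.2.items]
    let d : PySem.Dict String String := ((PySem.Dict.empty).insert "type" "").insert "location" ""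
    let d := if PySem.Str.isIn "IOUSBHostDevice" line then d.insert "type" "USB Device"
      else if PySem.Str.isIn "IOPCIDevice" line then d.insert "type" "PCI Device" else d
    -- line.split("@")[1]: the guard '"@" in line' guarantees ≥ 2 parts, so [1]? with default is exact
    let location := if PySem.Str.isIn "@" line then
        PySem.Str.strip ((((PySem.Str.split? line "@").getD [])[1]?).getD "") else "Desconhecido"
    (filtered, d.insert "location" location)
  else if PySem.Str.isIn "|" line && !st.2.items.isEmpty then
    -- line.strip().split(" ")[-1]: split with a nonempty separator is never empty, so [-1] is exact
    let connected := (PySem.List.pyGet?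
        ((PySem.Str.split? (PySem.Str.strip line) " ").getD []) (-1)).getD ""
    (st.1, st.2.insert "connected" connected)
  else st

def parse_ioreg_output (output : String) : List (List (String × String)) :=
  let lines := (PySem.Str.split? output "\n").getD []   -- '\n' ≠ '' so split? is exact
  let st := lines.foldl pvA_step ([], PySem.Dict.empty)
  if st.2.items.isEmpty then st.1 else st.1 ++ [st.2.items]

-- ===== PORT B =====
-- the device dict built at a header line, given the pending 'connected' token
def pvB_device (line : String) (connected : Option String) : PySem.Dict String String :=
  let d : PySem.Dict String String := ((PySem.Dict.empty).insert "type"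
      (if PySem.Str.isIn "IOUSBHostDevice" line then "USB Device" else "PCI Device")).insert "location"
      (if PySem.Str.isIn "@" line then
        PySem.Str.strip ((((PySem.Str.split? line "@").getD [])[1]?).getD "") else "Desconhecido")
  match connected with
  | some c => d.insert "connected" c
  | none => d

-- one iteration of B's reversed for-loop; state = (result, connected)
def pvB_step (st : List (List (String × String)) × Option String) (line : String) :
    List (List (String × String)) × Option String :=
  if PySem.Str.isIn "IOUSBHostDevice" line || PySem.Str.isIn "IOPCIDevice" line then
    (st.1 ++ [(pvB_device line st.2).items], none)
  else if st.2.isNone && PySem.Str.isIn "|" line then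
    (st.1, some ((PySem.List.pyGet?
        ((PySem.Str.split? (PySem.Str.strip line) " ").getD []) (-1)).getD ""))
  else st

def parse_ioreg_output_alt (output : String) : List (List (String × String)) :=
  let lines := (PySem.Str.split? output "\n").getD []
  let st := lines.reverse.foldl pvB_step ([], none)
  st.1.reverse

-- ===== PRECONDITION & SPEC =====
def Spec_parse_ioreg_output (output : String) (out : List (List (String × String))) : Prop := out = parse_ioreg_output_alt output
instance (output : String) (out : List (List (String × String))) : Decidable (Spec_parse_ioreg_output output out) := by unfold Spec_parse_ioreg_output; infer_instance

-- ===== CLAIM (what is proved, stated in full; the proofs are below) =====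
def Claim_equal_parse_ioreg_output : Prop := ∀ (output : String), Dom_parse_ioreg_output output → Spec_parse_ioreg_output output (parse_ioreg_output output)

-- ===== LEMMAS AND PROOFS =====

-- what A will eventually emit for the pending device, given the pending token B holds
def pvFlush (cur : PySem.Dict String String) (conn : Option String) : List (List (String × String)) :=
  if cur.items.isEmpty then []
  else [(match conn with | some c => cur.insert "connected" c | none => cur).items]

lemma pv_insert_items_ne_nil {κ ν : Type} [BEq κ] (d : PySem.Dict κ ν) (k : κ) (v : ν)
    (h : d.items.isEmpty = false) : (d.insert k v).items.isEmpty = false := by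
  simp only [PySem.Dict.insert]
  split <;> simp_all

lemma pvFlush_insert (cur : PySem.Dict String String) (c : String) (conn : Option String)
    (h : cur.items.isEmpty = false) :
    pvFlush (cur.insert "connected" c) conn
      = pvFlush cur (if conn.isNone then some c else conn) := by
  cases conn with
  | none => simp [pvFlush, h, pv_insert_items_ne_nil _ _ _ h]
  | some c2 =>
      simp [pvFlush, h, pv_insert_items_ne_nil _ _ _ h, PySem.Dict.insert_insert_self]

-- at a header line, A's pending device (after a possible run of '|' updates recorded in conn)
-- has exactly the items of B's device
lemma pv_header_device (l : String) (conn : Option String)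
    (h : PySem.Chars.isIn ['I','O','U','S','B','H','o','s','t','D','e','v','i','c','e'] l.toList = true
       ∨ PySem.Chars.isIn ['I','O','P','C','I','D','e','v','i','c','e'] l.toList = true) :
    pvFlush
      ((if PySem.Chars.isIn ['I','O','U','S','B','H','o','s','t','D','e','v','i','c','e'] l.toList = true then
          ((PySem.Dict.empty.insert "type" "").insert "location" "").insert "type" "USB Device"
        else
          if PySem.Chars.isIn ['I','O','P','C','I','D','e','v','i','c','e'] l.toList = true then
            ((PySem.Dict.empty.insert "type" "").insert "location" "").insert "type" "PCI Device"
          else ((PySem.Dict.empty : PySem.Dict String String).insert "type" "").insert "location" "").insert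
        "location"
        (if PySem.Chars.isIn ['@'] l.toList = true then
          PySem.Str.strip (((PySem.Str.split? l "@").getD [])[1]?.getD "")
        else "Desconhecido")) conn
      = [(pvB_device l conn).items] := by
  by_cases hu : PySem.Chars.isIn ['I','O','U','S','B','H','o','s','t','D','e','v','i','c','e'] l.toList = true
  · cases conn <;>
      simp [pvFlush, pvB_device, hu, PySem.Dict.insert, PySem.Dict.empty, PySem.Dict.contains]
  · have hp := h.resolve_left hu
    have hu' : PySem.Chars.isIn ['I','O','U','S','B','H','o','s','t','D','e','v','i','c','e'] l.toList = false := by simpa using hu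
    cases conn <;>
      simp [pvFlush, pvB_device, hu', hp, PySem.Dict.insert, PySem.Dict.empty, PySem.Dict.contains]

-- the main invariant: A's forward fold (from any state) against B's backward fold
lemma pv_main (ls : List String) :
    ∀ (acc : List (List (String × String))) (cur : PySem.Dict String String),
      (if (ls.foldl pvA_step (acc, cur)).2.items.isEmpty
        then (ls.foldl pvA_step (acc, cur)).1
        else (ls.foldl pvA_step (acc, cur)).1 ++ [(ls.foldl pvA_step (acc, cur)).2.items])
      = acc ++ pvFlush cur (ls.foldr (fun x y => pvB_step y x) ([], none)).2
            ++ (ls.foldr (fun x y => pvB_step y x) ([], none)).1.reverse := by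
  induction ls with
  | nil =>
      intro acc cur
      by_cases h : cur.items.isEmpty = true <;> simp [pvFlush, h]
  | cons l ls ih =>
      intro acc cur
      simp only [List.foldl_cons, List.foldr_cons]
      set r := ls.foldr (fun x y => pvB_step y x) ([], none)
      by_cases hU : PySem.Chars.isIn ['I','O','U','S','B','H','o','s','t','D','e','v','i','c','e'] l.toList = true
      ·
        have hA : pvA_step (acc, cur) l =
            ((if cur.items = [] then acc else acc ++ [cur.items]),
             ((if PySem.Chars.isIn ['I','O','U','S','B','H','o','s','t','D','e','v','i','c','e'] l.toList = true then
                 ((PySem.Dict.empty.insert "type" "").insert "location" "").insert "type" "USB Device"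
               else
                 if PySem.Chars.isIn ['I','O','P','C','I','D','e','v','i','c','e'] l.toList = true then
                   ((PySem.Dict.empty.insert "type" "").insert "location" "").insert "type" "PCI Device"
                 else ((PySem.Dict.empty : PySem.Dict String String).insert "type" "").insert "location" "").insert
               "location"
               (if PySem.Chars.isIn ['@'] l.toList = true then
                 PySem.Str.strip (((PySem.Str.split? l "@").getD [])[1]?.getD "")
               else "Desconhecido"))) := by
          simp [pvA_step, hU]; try rfl
        have hB : pvB_step r l = (r.1 ++ [(pvB_device l r.2).items], none) := by
          simp [pvB_step, hU]
        rw [hA, ih, hB, pv_header_device l r.2 (Or.inl hU)]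
        by_cases hc : cur.items = [] <;> simp [pvFlush, hc]
      · by_cases hP : PySem.Chars.isIn ['I','O','P','C','I','D','e','v','i','c','e'] l.toList = true
        ·
          have hA : pvA_step (acc, cur) l =
              ((if cur.items = [] then acc else acc ++ [cur.items]),
               ((if PySem.Chars.isIn ['I','O','U','S','B','H','o','s','t','D','e','v','i','c','e'] l.toList = true then
                   ((PySem.Dict.empty.insert "type" "").insert "location" "").insert "type" "USB Device"
                 else
                   if PySem.Chars.isIn ['I','O','P','C','I','D','e','v','i','c','e'] l.toList = true then
                     ((PySem.Dict.empty.insert "type" "").insert "location" "").insert "type" "PCI Device"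
                   else ((PySem.Dict.empty : PySem.Dict String String).insert "type" "").insert "location" "").insert
                 "location"
                 (if PySem.Chars.isIn ['@'] l.toList = true then
                   PySem.Str.strip (((PySem.Str.split? l "@").getD [])[1]?.getD "")
                 else "Desconhecido"))) := by
            have hU' : PySem.Chars.isIn ['I','O','U','S','B','H','o','s','t','D','e','v','i','c','e'] l.toList = false := by
              simpa using hU
            simp [pvA_step, hP, hU']; try rfl
          have hB : pvB_step r l = (r.1 ++ [(pvB_device l r.2).items], none) := by
            simp [pvB_step, hP]
          rw [hA, ih, hB, pv_header_device l r.2 (Or.inr hP)]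
          by_cases hc : cur.items = [] <;> simp [pvFlush, hc]
        · have hU' : PySem.Chars.isIn ['I','O','U','S','B','H','o','s','t','D','e','v','i','c','e'] l.toList = false := by simpa using hU
          have hP' : PySem.Chars.isIn ['I','O','P','C','I','D','e','v','i','c','e'] l.toList = false := by simpa using hP
          by_cases hl : PySem.Chars.isIn ['|'] l.toList = true
          · by_cases hc : cur.items = []
            · have hA : pvA_step (acc, cur) l = (acc, cur) := by
                simp [pvA_step, hU', hP', hc]
              rw [hA, ih]
              by_cases hn : r.2 = none
              · have hB : pvB_step r l = (r.1, some ((PySem.List.pyGet? ((PySem.Str.split? (PySem.Str.strip l) " ").getD []) (-1)).getD "")) := by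
                  simp [pvB_step, hU', hP', hl, hn]
                rw [hB]; simp [pvFlush, hc]
              · have hB : pvB_step r l = r := by simp [pvB_step, hU', hP', hn]
                rw [hB]
            · have hcur' : cur.items.isEmpty = false := by
                cases hi : cur.items <;> simp_all
              have hA : pvA_step (acc, cur) l = (acc, cur.insert "connected" ((PySem.List.pyGet? ((PySem.Str.split? (PySem.Str.strip l) " ").getD []) (-1)).getD "")) := by
                simp [pvA_step, hU', hP', hl, hc]
              rw [hA, ih, pvFlush_insert _ _ _ hcur']
              by_cases hn : r.2 = none
              · have hB : pvB_step r l = (r.1, some ((PySem.List.pyGet? ((PySem.Str.split? (PySem.Str.strip l) " ").getD []) (-1)).getD "")) := by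
                  simp [pvB_step, hU', hP', hl, hn]
                rw [hB]; simp [hn]
              · obtain ⟨v, hv⟩ := Option.ne_none_iff_exists'.mp hn
                have hB : pvB_step r l = r := by simp [pvB_step, hU', hP', hn]
                rw [hB]; simp [hv]
          · have hl' : PySem.Chars.isIn ['|'] l.toList = false := by simpa using hl
            have hA : pvA_step (acc, cur) l = (acc, cur) := by simp [pvA_step, hU', hP', hl']
            have hB : pvB_step r l = r := by simp [pvB_step, hU', hP', hl']
            rw [hA, ih, hB]

-- ===== VERDICT (by name: the statement is the Claim_ definition above) =====
theorem parse_ioreg_output_spec : Claim_equal_parse_ioreg_output := by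
  intro output _
  unfold Spec_parse_ioreg_output parse_ioreg_output parse_ioreg_output_alt
  simp only [List.foldl_reverse]
  rw [pv_main ((PySem.Str.split? output "\n").getD []) [] PySem.Dict.empty]
  simp [pvFlush, PySem.Dict.empty]
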